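-- pv_equiv track=rewrite | github.com/burning-calamity/extirpation | src/extirpation/bundled_online/fibonacci_shift.py | fibonacci_shift_decrypt
-- ===== SOURCE A (Python) =====
-- def _shift_char(ch: str, shift: int) -> str:
--     if "A" <= ch <= "Z":
--         return chr((ord(ch) - ord("A") + shift) % 26 + ord("A"))
--     if "a" <= ch <= "z":
--         return chr((ord(ch) - ord("a") + shift) % 26 + ord("a"))
--     return ch
--
-- def _fib_sequence(n: int) -> list[int]:
--     if n <= 0:
--         return []
--     if n == 1:
--         return [1]
--     seq = [1, 1]
--     while len(seq) < n:
--         seq.append(seq[-1] + seq[-2])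
--     return seq
--
-- def fibonacci_shift_decrypt(ciphertext: str, seed_shift: int = 0) -> str:
--     letters = [ch for ch in ciphertext if ch.isalpha()]
--     fib = _fib_sequence(len(letters))
--     out: list[str] = []
--     idx = 0
--     for ch in ciphertext:
--         if ch.isalpha():
--             out.append(_shift_char(ch, -(seed_shift + fib[idx])))
--             idx += 1
--         else:
--             out.append(ch)
--     return "".join(out)
-- ===== SOURCE B (Python) =====
-- def fibonacci_shift_decrypt(ciphertext: str, seed_shift: int = 0) -> str:
--     # One pass: maintain the Fibonacci pair reduced mod 26 instead of building
--     # the full big-integer Fibonacci list and indexing into it.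
--     s = seed_shift % 26
--     a, b = 1, 1
--     out = []
--     for ch in ciphertext:
--         if "A" <= ch <= "Z":
--             out.append(chr((ord(ch) - ord("A") - s - a) % 26 + ord("A")))
--             a, b = b, (a + b) % 26
--         elif "a" <= ch <= "z":
--             out.append(chr((ord(ch) - ord("a") - s - a) % 26 + ord("a")))
--             a, b = b, (a + b) % 26
--         else:
--             out.append(ch)
--     return "".join(out)
-- ===== Notes on version B (the rewrite author's own statement) =====
-- stated objective: faster
-- what changed: Instead of first collecting all letters, building the full big-integer Fibonacci list and indexing into it, B makes a single pass carrying the Fibonacci pair reduced mod 26 (and seed_shift mod 26), shifting each letter as it goes.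
import Mathlib
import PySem

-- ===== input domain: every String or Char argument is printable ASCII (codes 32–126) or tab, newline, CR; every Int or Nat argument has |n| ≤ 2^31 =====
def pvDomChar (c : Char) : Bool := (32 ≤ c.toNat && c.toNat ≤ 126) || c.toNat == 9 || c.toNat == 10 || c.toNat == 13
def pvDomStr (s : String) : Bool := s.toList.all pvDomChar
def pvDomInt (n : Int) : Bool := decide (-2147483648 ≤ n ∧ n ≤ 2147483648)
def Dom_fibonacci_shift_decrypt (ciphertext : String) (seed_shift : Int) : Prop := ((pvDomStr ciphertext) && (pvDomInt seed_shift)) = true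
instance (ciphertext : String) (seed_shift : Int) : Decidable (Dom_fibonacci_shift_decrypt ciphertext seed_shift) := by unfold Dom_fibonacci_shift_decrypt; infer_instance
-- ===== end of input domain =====

-- B replaces A's "collect the letters, build the full big-integer Fibonacci list, index into it"
-- with a single pass carrying the Fibonacci pair reduced mod 26 (objective: faster, measured).

-- ===== PORT A =====
def pvShiftChar (ch : Char) (shift : Int) : Char :=
  if 'A' ≤ ch ∧ ch ≤ 'Z' then
    Char.ofNat ((PySem.Int.mod ((ch.toNat : Int) - 65 + shift) 26).toNat + 65)
  else if 'a' ≤ ch ∧ ch ≤ 'z' then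
    Char.ofNat ((PySem.Int.mod ((ch.toNat : Int) - 97 + shift) 26).toNat + 97)
  else ch

-- the while-loop of _fib_sequence: each pass appends one element, so n - len(seq) is the fuel
def pvFibWhile : Nat → List Int → List Int
  | 0, seq => seq
  | fuel+1, seq => pvFibWhile fuel (seq ++ [PySem.List.pyGetD seq (-1) 0 + PySem.List.pyGetD seq (-2) 0])

def pvFibSequence (n : Int) : List Int :=
  if n ≤ 0 then [] else if n = 1 then [1] else pvFibWhile (n.toNat - 2) [1, 1]

def fibonacci_shift_decrypt (ciphertext : String) (seed_shift : Int) : String :=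
  let letters := ciphertext.toList.filter PySem.Chars.isalpha
  let fib := pvFibSequence (letters.length : Int)
  let r := ciphertext.toList.foldl (fun (st : List Char × Int) ch =>
    if PySem.Chars.isalpha ch then
      (st.1 ++ [pvShiftChar ch (-(seed_shift + PySem.List.pyGetD fib st.2 0))], st.2 + 1)
    else
      (st.1 ++ [ch], st.2)) ([], 0)
  String.mk r.1

-- ===== PORT B =====
def fibonacci_shift_decrypt_alt (ciphertext : String) (seed_shift : Int) : String :=
  let s := PySem.Int.mod seed_shift 26
  let r := ciphertext.toList.foldl (fun (st : List Char × Int × Int) ch =>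
    if 'A' ≤ ch ∧ ch ≤ 'Z' then
      (st.1 ++ [Char.ofNat ((PySem.Int.mod ((ch.toNat : Int) - 65 - s - st.2.1) 26).toNat + 65)],
       st.2.2, PySem.Int.mod (st.2.1 + st.2.2) 26)
    else if 'a' ≤ ch ∧ ch ≤ 'z' then
      (st.1 ++ [Char.ofNat ((PySem.Int.mod ((ch.toNat : Int) - 97 - s - st.2.1) 26).toNat + 97)],
       st.2.2, PySem.Int.mod (st.2.1 + st.2.2) 26)
    else
      (st.1 ++ [ch], st.2)) ([], 1, 1)
  String.mk r.1

-- ===== PRECONDITION & SPEC =====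
def Spec_fibonacci_shift_decrypt (ciphertext : String) (seed_shift : Int) (out : String) : Prop := out = fibonacci_shift_decrypt_alt ciphertext seed_shift
instance (ciphertext : String) (seed_shift : Int) (out : String) : Decidable (Spec_fibonacci_shift_decrypt ciphertext seed_shift out) := by unfold Spec_fibonacci_shift_decrypt; infer_instance

-- ===== CLAIM (what is proved, stated in full; the proofs are below) =====
def Claim_equal_fibonacci_shift_decrypt : Prop := ∀ (ciphertext : String) (seed_shift : Int), Dom_fibonacci_shift_decrypt ciphertext seed_shift → Spec_fibonacci_shift_decrypt ciphertext seed_shift (fibonacci_shift_decrypt ciphertext seed_shift)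

-- ===== LEMMAS AND PROOFS =====

-- the mathematical Fibonacci sequence A's list holds (1, 1, 2, 3, ...)
def pvF : Nat → Int
  | 0 => 1
  | 1 => 1
  | k+2 => pvF k + pvF (k+1)

theorem pvF_add_two (k : Nat) : pvF (k+2) = pvF k + pvF (k+1) := rfl

theorem pvFibWhile_eq (fuel : Nat) : ∀ (j : Nat), 2 ≤ j →
    pvFibWhile fuel ((List.range j).map pvF) = (List.range (j + fuel)).map pvF := by
  induction fuel with
  | zero => intro j _; simp [pvFibWhile]
  | succ f ih =>
    intro j hj
    obtain ⟨k, rfl⟩ : ∃ k, j = k + 2 := ⟨j - 2, by omega⟩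
    have hlen : ((List.range (k+2)).map pvF).length = k + 2 := by simp
    rw [pvFibWhile,
      PySem.List.pyGetD_neg_ofNat _ 1 0 (by omega) (by omega),
      PySem.List.pyGetD_neg_ofNat _ 2 0 (by omega) (by omega)]
    have h1 : ((List.range (k+2)).map pvF)[((List.range (k+2)).map pvF).length - 1] = pvF (k+1) := by
      simp
    have h2 : ((List.range (k+2)).map pvF)[((List.range (k+2)).map pvF).length - 2] = pvF k := by
      simp
    rw [h1, h2]
    have hstep : (List.range (k+2)).map pvF ++ [pvF (k+1) + pvF k] = (List.range (k+3)).map pvF := by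
      have : pvF (k+1) + pvF k = pvF (k+2) := by rw [pvF_add_two]; ring
      rw [this, show k+3 = (k+2)+1 from rfl, List.range_succ]; simp [List.range_succ]
    rw [hstep, ih (k+3) (by omega), show k+3+f = k+2+(f+1) from by omega]

theorem pvFibSequence_eq (n : Nat) : pvFibSequence (n : Int) = (List.range n).map pvF := by
  match n with
  | 0 => simp [pvFibSequence]
  | 1 => simp [pvFibSequence, List.range_succ, pvF]
  | (m+2) =>
    have h0 : ¬ ((m+2 : Nat) : Int) ≤ 0 := by omega
    have h1 : ((m+2 : Nat) : Int) ≠ 1 := by omega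
    rw [pvFibSequence, if_neg h0, if_neg h1]
    have ht : (((m+2 : Nat) : Int)).toNat - 2 = m := by
      rw [Int.toNat_natCast]; omega
    rw [ht, show [(1 : Int), 1] = (List.range 2).map pvF from by decide,
      pvFibWhile_eq m 2 (by omega), show 2 + m = m + 2 from by omega]

-- two Int.mod-by-26 facts used per letter
theorem pvMod_shift_eq (x seed F : Int) :
    PySem.Int.mod (x + -(seed + F)) 26
      = PySem.Int.mod (x - PySem.Int.mod seed 26 - PySem.Int.mod F 26) 26 := by
  simp only [PySem.Int.mod_eq_emod_of_pos (show (0:Int) < 26 by norm_num)]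
  omega

theorem pvMod_pair_eq (a b : Int) :
    PySem.Int.mod (PySem.Int.mod a 26 + PySem.Int.mod b 26) 26 = PySem.Int.mod (a + b) 26 := by
  simp only [PySem.Int.mod_eq_emod_of_pos (show (0:Int) < 26 by norm_num)]
  omega

-- the fib-list lookup at an in-range index
theorem pvFib_lookup (n j : Nat) (hj : j < n) :
    PySem.List.pyGetD ((List.range n).map pvF) (j : Int) 0 = pvF j := by
  rw [PySem.List.pyGetD_natCast]
  simp [List.getD, hj]

-- main loop invariant: A's fold (indexing the fib list at idx) agrees with B's fold
-- (carrying the Fibonacci pair mod 26) on the accumulated output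
theorem pvLoop_eq (n : Nat) (seed : Int) (cs : List Char) : ∀ (out : List Char) (j : Nat),
    j + (cs.filter PySem.Chars.isalpha).length ≤ n →
    (cs.foldl (fun (st : List Char × Int) ch =>
      if PySem.Chars.isalpha ch then
        (st.1 ++ [pvShiftChar ch (-(seed + PySem.List.pyGetD ((List.range n).map pvF) st.2 0))], st.2 + 1)
      else (st.1 ++ [ch], st.2)) (out, (j : Int))).1
    = (cs.foldl (fun (st : List Char × Int × Int) ch =>
        if 'A' ≤ ch ∧ ch ≤ 'Z' then
          (st.1 ++ [Char.ofNat ((PySem.Int.mod ((ch.toNat : Int) - 65 - PySem.Int.mod seed 26 - st.2.1) 26).toNat + 65)],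
           st.2.2, PySem.Int.mod (st.2.1 + st.2.2) 26)
        else if 'a' ≤ ch ∧ ch ≤ 'z' then
          (st.1 ++ [Char.ofNat ((PySem.Int.mod ((ch.toNat : Int) - 97 - PySem.Int.mod seed 26 - st.2.1) 26).toNat + 97)],
           st.2.2, PySem.Int.mod (st.2.1 + st.2.2) 26)
        else (st.1 ++ [ch], st.2))
        (out, PySem.Int.mod (pvF j) 26, PySem.Int.mod (pvF (j+1)) 26)).1 := by
  induction cs with
  | nil => intro out j _; simp
  | cons ch cs ih =>
    intro out j hcnt
    by_cases hal : PySem.Chars.isalpha ch = true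
    · have hj : j < n := by
        have : (List.filter PySem.Chars.isalpha (ch :: cs)).length = (cs.filter PySem.Chars.isalpha).length + 1 := by
          simp [hal]
        omega
      have hcnt' : (j+1) + (cs.filter PySem.Chars.isalpha).length ≤ n := by
        have : (List.filter PySem.Chars.isalpha (ch :: cs)).length = (cs.filter PySem.Chars.isalpha).length + 1 := by
          simp [hal]
        omega
      have hpair : PySem.Int.mod (PySem.Int.mod (pvF j) 26 + PySem.Int.mod (pvF (j+1)) 26) 26
          = PySem.Int.mod (pvF (j+1+1)) 26 := by
        rw [pvMod_pair_eq]; rfl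
      rcases (by simpa [PySem.Chars.isalpha, PySem.Chars.isupper, PySem.Chars.islower] using hal :
          ('A' ≤ ch ∧ ch ≤ 'Z') ∨ ('a' ≤ ch ∧ ch ≤ 'z')) with hU | hL
      · have hch : pvShiftChar ch (-(seed + PySem.List.pyGetD ((List.range n).map pvF) (j : Int) 0))
            = Char.ofNat ((PySem.Int.mod ((ch.toNat : Int) - 65 - PySem.Int.mod seed 26 - PySem.Int.mod (pvF j) 26) 26).toNat + 65) := by
          rw [pvFib_lookup n j hj, pvShiftChar, if_pos hU, pvMod_shift_eq]
        simp only [List.foldl_cons, if_pos hal, if_pos hU]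
        rw [hch]
        have := ih (out ++ [Char.ofNat ((PySem.Int.mod ((ch.toNat : Int) - 65 - PySem.Int.mod seed 26 - PySem.Int.mod (pvF j) 26) 26).toNat + 65)]) (j+1) hcnt'
        rw [hpair]
        push_cast at this ⊢
        exact this
      · have hnU : ¬ ('A' ≤ ch ∧ ch ≤ 'Z') := by
          rintro ⟨h1, h2⟩
          rcases hL with ⟨h3, _⟩
          exact absurd (le_trans h3 h2) (by decide)
        have hch : pvShiftChar ch (-(seed + PySem.List.pyGetD ((List.range n).map pvF) (j : Int) 0))
            = Char.ofNat ((PySem.Int.mod ((ch.toNat : Int) - 97 - PySem.Int.mod seed 26 - PySem.Int.mod (pvF j) 26) 26).toNat + 97) := by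
          rw [pvFib_lookup n j hj, pvShiftChar, if_neg hnU, if_pos hL, pvMod_shift_eq]
        simp only [List.foldl_cons, if_pos hal, if_neg hnU, if_pos hL]
        rw [hch]
        have := ih (out ++ [Char.ofNat ((PySem.Int.mod ((ch.toNat : Int) - 97 - PySem.Int.mod seed 26 - PySem.Int.mod (pvF j) 26) 26).toNat + 97)]) (j+1) hcnt'
        rw [hpair]
        push_cast at this ⊢
        exact this
    · have hnU : ¬ ('A' ≤ ch ∧ ch ≤ 'Z') := fun h => hal (by
        simp [PySem.Chars.isalpha, PySem.Chars.isupper, PySem.Chars.islower, h.1, h.2])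
      have hnL : ¬ ('a' ≤ ch ∧ ch ≤ 'z') := fun h => hal (by
        simp [PySem.Chars.isalpha, PySem.Chars.isupper, PySem.Chars.islower, h.1, h.2])
      have hcnt' : j + (cs.filter PySem.Chars.isalpha).length ≤ n := by
        have : (List.filter PySem.Chars.isalpha (ch :: cs)).length = (cs.filter PySem.Chars.isalpha).length := by
          simp [hal]
        omega
      simp only [List.foldl_cons, if_neg hal, if_neg hnU, if_neg hnL]
      exact ih (out ++ [ch]) j hcnt'

-- ===== VERDICT (by name: the statement is the Claim_ definition above) =====
theorem fibonacci_shift_decrypt_spec : Claim_equal_fibonacci_shift_decrypt := by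
  intro ciphertext seed_shift _
  unfold Spec_fibonacci_shift_decrypt fibonacci_shift_decrypt fibonacci_shift_decrypt_alt
  simp only
  rw [pvFibSequence_eq]
  congr 1
  have h0 : ((0 : Nat) : Int) = (0 : Int) := rfl
  have := pvLoop_eq (ciphertext.toList.filter PySem.Chars.isalpha).length seed_shift
      ciphertext.toList [] 0 (by omega)
  simpa [pvF] using this
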